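-- pv_equiv track=rewrite | github.com/pypi-data/pypi-mirror-365 | packages/adversary-mcp-server/adversary_mcp_server-0.9.8-py3-none-any.whl/adversary_mcp_server/threat_modeling/extractors/base_extractor.py | _get_entity_group
-- ===== SOURCE A (Python) =====
-- def _get_entity_group(entity: str) -> str:
--     """Get the group classification for an external entity."""
--     entity_lower = entity.lower()
--
--     # Payment and financial services
--     if any(
--         term in entity_lower for term in ["stripe", "paypal", "square", "payment"]
--     ):
--         return "Payment Services"
--
--     # Communication services
--     if any(term in entity_lower for term in ["twilio", "sendgrid", "mail", "sms"]):
--         return "Communication Services"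
--
--     # Cloud services
--     if any(term in entity_lower for term in ["aws", "google", "azure", "cloud"]):
--         return "Cloud Services"
--
--     # Authentication services
--     if any(term in entity_lower for term in ["auth", "oauth", "sso", "login"]):
--         return "Authentication Services"
--
--     # Development services
--     if any(
--         term in entity_lower for term in ["github", "gitlab", "bitbucket", "git"]
--     ):
--         return "Development Services"
--
--     # Generic or unknown APIs
--     return "Generic API"
-- ===== SOURCE B (Python) =====
-- # Flat keyword -> priority table; aggregate with min instead of a cascade of
-- # early-return checks, then index into the group table.
-- KEYWORD_PRIORITY = {
--     "stripe": 0, "paypal": 0, "square": 0, "payment": 0,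
--     "twilio": 1, "sendgrid": 1, "mail": 1, "sms": 1,
--     "aws": 2, "google": 2, "azure": 2, "cloud": 2,
--     "auth": 3, "oauth": 3, "sso": 3, "login": 3,
--     "github": 4, "gitlab": 4, "bitbucket": 4, "git": 4,
-- }
--
-- GROUPS = [
--     "Payment Services",
--     "Communication Services",
--     "Cloud Services",
--     "Authentication Services",
--     "Development Services",
--     "Generic API",
-- ]
--
--
-- def _get_entity_group(entity: str) -> str:
--     """Get the group classification for an external entity."""
--     entity_lower = entity.lower()
--     best = len(GROUPS) - 1
--     for keyword, priority in KEYWORD_PRIORITY.items():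
--         if keyword in entity_lower:
--             best = min(best, priority)
--     return GROUPS[best]
-- ===== Notes on version B (the rewrite author's own statement) =====
-- stated objective: alternative
-- what changed: Replaced A's cascade of five early-return group checks with a flat keyword-to-priority table scanned once while aggregating the minimum matched priority, which then indexes a group-name table.
import Mathlib
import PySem

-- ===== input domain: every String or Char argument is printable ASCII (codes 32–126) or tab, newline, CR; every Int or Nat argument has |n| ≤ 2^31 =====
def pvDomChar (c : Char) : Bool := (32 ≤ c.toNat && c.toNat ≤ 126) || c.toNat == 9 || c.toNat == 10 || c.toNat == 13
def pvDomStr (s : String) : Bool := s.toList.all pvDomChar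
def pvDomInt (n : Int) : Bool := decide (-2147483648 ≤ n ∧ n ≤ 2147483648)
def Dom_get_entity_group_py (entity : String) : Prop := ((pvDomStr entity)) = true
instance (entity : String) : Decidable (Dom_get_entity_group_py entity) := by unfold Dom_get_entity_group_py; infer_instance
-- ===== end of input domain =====

-- B replaces A's cascade of five early-return group checks with a flat keyword->priority
-- table aggregated by a min-accumulator, then indexed into a group-name table (objective:
-- alternative); same return value everywhere.


-- ===== PORT A =====
def get_entity_group_py (entity : String) : String :=
  let entity_lower := PySem.Str.lower entity
  if ["stripe", "paypal", "square", "payment"].any (fun term => PySem.Str.isIn term entity_lower) then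
    "Payment Services"
  else if ["twilio", "sendgrid", "mail", "sms"].any (fun term => PySem.Str.isIn term entity_lower) then
    "Communication Services"
  else if ["aws", "google", "azure", "cloud"].any (fun term => PySem.Str.isIn term entity_lower) then
    "Cloud Services"
  else if ["auth", "oauth", "sso", "login"].any (fun term => PySem.Str.isIn term entity_lower) then
    "Authentication Services"
  else if ["github", "gitlab", "bitbucket", "git"].any (fun term => PySem.Str.isIn term entity_lower) then
    "Development Services"
  else
    "Generic API"

-- ===== PORT B =====
-- KEYWORD_PRIORITY.items() in insertion order (keys are distinct)
def pvKeywordPriority : List (String × Nat) :=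
  [("stripe", 0), ("paypal", 0), ("square", 0), ("payment", 0),
   ("twilio", 1), ("sendgrid", 1), ("mail", 1), ("sms", 1),
   ("aws", 2), ("google", 2), ("azure", 2), ("cloud", 2),
   ("auth", 3), ("oauth", 3), ("sso", 3), ("login", 3),
   ("github", 4), ("gitlab", 4), ("bitbucket", 4), ("git", 4)]

def pvGroups : List String :=
  ["Payment Services", "Communication Services", "Cloud Services",
   "Authentication Services", "Development Services", "Generic API"]

def get_entity_group_py_alt (entity : String) : String :=
  let entity_lower := PySem.Str.lower entity
  -- best = len(GROUPS) - 1; for keyword, priority in ...: if keyword in s: best = min(best, priority)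
  let best := pvKeywordPriority.foldl
    (fun b kw => if PySem.Str.isIn kw.1 entity_lower then min b kw.2 else b)
    (pvGroups.length - 1)
  -- GROUPS[best]: best ≤ 5 always, so the index is always in range
  pvGroups.getD best ""

-- ===== PRECONDITION & SPEC =====
def Spec_get_entity_group_py (entity : String) (out : String) : Prop := out = get_entity_group_py_alt entity
instance (entity : String) (out : String) : Decidable (Spec_get_entity_group_py entity out) := by unfold Spec_get_entity_group_py; infer_instance

-- ===== CLAIM (what is proved, stated in full; the proofs are below) =====
def Claim_equal_get_entity_group_py : Prop := ∀ (entity : String), Dom_get_entity_group_py entity → Spec_get_entity_group_py entity (get_entity_group_py entity)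

-- ===== LEMMAS AND PROOFS =====

-- folding the min-accumulator over a block of keywords that all carry the same priority p
theorem pv_foldl_min_block (s : String) (terms : List String) (p acc : Nat) :
    (terms.map (fun t => (t, p))).foldl
      (fun b kw => if PySem.Str.isIn kw.1 s then min b kw.2 else b) acc
    = if terms.any (fun t => PySem.Str.isIn t s) then min acc p else acc := by
  induction terms generalizing acc with
  | nil => simp
  | cons t ts ih =>
    simp only [List.map_cons, List.foldl_cons, List.any_cons, ih]
    by_cases h : PySem.Str.isIn t s = true <;>
      by_cases h2 : (ts.any fun t => PySem.Str.isIn t s) = true <;>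
      simp only [h, h2, Bool.true_or, Bool.false_or, if_true, Bool.not_eq_true] at * <;>
      simp [h, h2, Nat.min_assoc]

-- ===== VERDICT (by name: the statement is the Claim_ definition above) =====
theorem get_entity_group_py_spec : Claim_equal_get_entity_group_py := by
  intro entity _
  unfold Spec_get_entity_group_py get_entity_group_py get_entity_group_py_alt
  set s := PySem.Str.lower entity with hs
  have hk : pvKeywordPriority =
      (["stripe", "paypal", "square", "payment"].map (fun t => (t, 0)))
      ++ (["twilio", "sendgrid", "mail", "sms"].map (fun t => (t, 1)))
      ++ (["aws", "google", "azure", "cloud"].map (fun t => (t, 2)))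
      ++ (["auth", "oauth", "sso", "login"].map (fun t => (t, 3)))
      ++ (["github", "gitlab", "bitbucket", "git"].map (fun t => (t, 4))) := rfl
  rw [hk]
  simp only [List.foldl_append, pv_foldl_min_block]
  by_cases h0 : (["stripe", "paypal", "square", "payment"].any (fun t => PySem.Str.isIn t s)) = true <;>
  by_cases h1 : (["twilio", "sendgrid", "mail", "sms"].any (fun t => PySem.Str.isIn t s)) = true <;>
  by_cases h2 : (["aws", "google", "azure", "cloud"].any (fun t => PySem.Str.isIn t s)) = true <;>
  by_cases h3 : (["auth", "oauth", "sso", "login"].any (fun t => PySem.Str.isIn t s)) = true <;>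
  by_cases h4 : (["github", "gitlab", "bitbucket", "git"].any (fun t => PySem.Str.isIn t s)) = true <;>
  simp_all [PySem.Str.isIn, pvGroups]
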